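-- pv_equiv track=rewrite | github.com/mrjoe99/advent2023 | advent_3.py | check_above_left
-- ===== SOURCE A (Python) =====
-- def check_above_left(number, symbols):
--     for position in number[1]:
--         y = position[0] + 1
--         x = position[1] - 1
--
--         for symbol in symbols:
--             if [y, x] == symbol[1]:
--                 return True
--
--     return False
-- ===== SOURCE B (Python) =====
-- def check_above_left(number, symbols):
--     targets = {(p[0] + 1, p[1] - 1) for p in number[1]}
--     symbolset = {tuple(s[1]) for s in symbols}
--     return bool(targets & symbolset)
-- ===== Notes on version B (the rewrite author's own statement) =====
-- stated objective: idiomatic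
-- what changed: Replaces the nested scan with early return by building the set of shifted position coordinates and the set of symbol coordinates once and testing their intersection for non-emptiness.
-- outside the precondition, e.g. on check_above_left((0, [[0, 0], [5]]), [(0, [1, -1])]): A returns True, B raises IndexError
import Mathlib
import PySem

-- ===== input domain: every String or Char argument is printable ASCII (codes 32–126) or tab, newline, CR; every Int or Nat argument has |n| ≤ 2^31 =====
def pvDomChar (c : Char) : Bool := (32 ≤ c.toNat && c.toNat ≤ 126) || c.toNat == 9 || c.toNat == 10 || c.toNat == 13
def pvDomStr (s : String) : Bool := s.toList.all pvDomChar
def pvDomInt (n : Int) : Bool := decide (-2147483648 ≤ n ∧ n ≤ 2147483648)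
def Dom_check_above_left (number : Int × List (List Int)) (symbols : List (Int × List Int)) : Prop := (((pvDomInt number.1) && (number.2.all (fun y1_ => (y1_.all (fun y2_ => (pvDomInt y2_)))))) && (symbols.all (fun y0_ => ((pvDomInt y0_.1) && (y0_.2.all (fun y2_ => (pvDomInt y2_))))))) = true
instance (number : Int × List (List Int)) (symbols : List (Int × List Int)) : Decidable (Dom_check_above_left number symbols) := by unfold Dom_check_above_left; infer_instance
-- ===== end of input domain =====

-- B replaces A's nested scan (with early return) by two coordinate sets built up front
-- and one set-intersection non-emptiness test; return value only, no side effects.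
-- ===== PORT A =====
-- y and x of a position; total via getD, exact on Pre_ (positions of length >= 2)
def pvKey (p : List Int) : List Int :=
  [(PySem.List.pyGet? p 0).getD 0 + 1, (PySem.List.pyGet? p 1).getD 0 - 1]

-- inner 'for symbol in symbols' loop with its early return
def pvLoopInner (yx : List Int) : List (Int × List Int) → Bool
  | [] => false
  | s :: rest => if yx == s.2 then true else pvLoopInner yx rest

-- outer 'for position in number[1]' loop
def pvLoopOuter (symbols : List (Int × List Int)) : List (List Int) → Bool
  | [] => false
  | p :: rest => if pvLoopInner (pvKey p) symbols then true else pvLoopOuter symbols rest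

def check_above_left (number : Int × List (List Int)) (symbols : List (Int × List Int)) : Bool :=
  pvLoopOuter symbols number.2

-- ===== PORT B =====
-- Python's 2-tuples are modelled as 2-element lists so both sets share one element type.
def check_above_left_alt (number : Int × List (List Int)) (symbols : List (Int × List Int)) : Bool :=
  let targets : PySem.Set (List Int) := PySem.Set.ofList (number.2.map pvKey)
  let symbolset : PySem.Set (List Int) := PySem.Set.ofList (symbols.map (fun s => s.2))
  PySem.Set.len (PySem.Set.inter targets symbolset) != 0

-- ===== PRECONDITION & SPEC =====
-- Pre_ excludes position lists shorter than 2, where building B's target set raises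
-- IndexError (A raises there too unless an earlier position already matched a symbol).
def Pre_check_above_left (number : Int × List (List Int)) (symbols : List (Int × List Int)) : Prop :=
  ∀ p ∈ number.2, 2 ≤ p.length
instance (number : Int × List (List Int)) (symbols : List (Int × List Int)) : Decidable (Pre_check_above_left number symbols) := by unfold Pre_check_above_left; infer_instance
def pvWitness_check_above_left : (Int × List (List Int)) × (List (Int × List Int)) :=
  ((0, [[0, 0]]), [(0, [1, -1])])
def Spec_check_above_left (number : Int × List (List Int)) (symbols : List (Int × List Int)) (out : Bool) : Prop := out = check_above_left_alt number symbols
instance (number : Int × List (List Int)) (symbols : List (Int × List Int)) (out : Bool) : Decidable (Spec_check_above_left number symbols out) := by unfold Spec_check_above_left; infer_instance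

-- ===== CLAIM (what is proved, stated in full; the proofs are below) =====
def Claim_equal_check_above_left : Prop := ∀ (number : Int × List (List Int)) (symbols : List (Int × List Int)), Dom_check_above_left number symbols → Pre_check_above_left number symbols → Spec_check_above_left number symbols (check_above_left number symbols)

-- ===== LEMMAS AND PROOFS =====

lemma pvLoopInner_eq_true_iff (yx : List Int) (ss : List (Int × List Int)) :
    pvLoopInner yx ss = true ↔ ∃ s ∈ ss, yx = s.2 := by
  induction ss with
  | nil => simp [pvLoopInner]
  | cons s rest ih =>
    simp only [pvLoopInner]
    split_ifs with h
    · simp_all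
    · simp only [ih, List.mem_cons]
      constructor
      · rintro ⟨t, ht, rfl⟩; exact ⟨t, Or.inr ht, rfl⟩
      · rintro ⟨t, (rfl | ht), rfl⟩
        · simp at h
        · exact ⟨t, ht, rfl⟩

lemma pvLoopOuter_eq_true_iff (symbols : List (Int × List Int)) (ps : List (List Int)) :
    pvLoopOuter symbols ps = true ↔ ∃ p ∈ ps, ∃ s ∈ symbols, pvKey p = s.2 := by
  induction ps with
  | nil => simp [pvLoopOuter]
  | cons p rest ih =>
    simp only [pvLoopOuter]
    split_ifs with h
    · rw [pvLoopInner_eq_true_iff] at h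
      simpa using Or.inl h
    · rw [ih]
      simp only [List.mem_cons]
      constructor
      · rintro ⟨q, hq, hs⟩; exact ⟨q, Or.inr hq, hs⟩
      · rintro ⟨q, (rfl | hq), hs⟩
        · exact absurd ((pvLoopInner_eq_true_iff _ _).mpr hs) (by simpa using h)
        · exact ⟨q, hq, hs⟩

lemma pvAlt_eq_true_iff (number : Int × List (List Int)) (symbols : List (Int × List Int)) :
    check_above_left_alt number symbols = true ↔
      ∃ p ∈ number.2, ∃ s ∈ symbols, pvKey p = s.2 := by
  unfold check_above_left_alt
  rw [bne_iff_ne]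
  have hlen : PySem.Set.len (PySem.Set.inter (PySem.Set.ofList (number.2.map pvKey))
      (PySem.Set.ofList (symbols.map (fun s => s.2)))) ≠ 0 ↔
      ∃ z, z ∈ PySem.Set.inter (PySem.Set.ofList (number.2.map pvKey))
        (PySem.Set.ofList (symbols.map (fun s => s.2))) := by
    rw [PySem.Set.len, ← List.length_pos_iff_exists_mem]
    omega
  rw [hlen]
  simp only [PySem.Set.mem_inter, PySem.Set.mem_ofList, List.mem_map]
  constructor
  · rintro ⟨z, ⟨p, hp, rfl⟩, s, hs, h⟩
    exact ⟨p, hp, s, hs, h.symm⟩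
  · rintro ⟨p, hp, s, hs, h⟩
    exact ⟨pvKey p, ⟨p, hp, rfl⟩, s, hs, h.symm⟩

-- ===== VERDICT (by name: the statement is the Claim_ definition above) =====
theorem check_above_left_spec : Claim_equal_check_above_left := by
  intro number symbols _ _
  unfold Spec_check_above_left check_above_left
  rw [Bool.eq_iff_iff, pvLoopOuter_eq_true_iff, pvAlt_eq_true_iff]
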